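-- pv_equiv track=rewrite | github.com/michahu/neuneu | src/meta/word_loss_converter.py | align_tokens_to_words
-- ===== SOURCE A (Python) =====
-- from typing import Dict, List, Optional, Tuple, Union
--
-- def align_tokens_to_words(
--     token_offsets: List[Tuple[int, int]],
--     word_spans: List[Tuple[int, int]],
-- ) -> List[List[int]]:
--     """
--     Map each whitespace word to the token indices that overlap with it.
--
--     A token is assigned to a word if their character spans overlap.
--     Tokens with (0, 0) offset (typically special tokens like BOS/EOS) are skipped.
--
--     Args:
--         token_offsets: List of (start, end) character offsets for each token
--         word_spans: List of (start, end) character offsets for each word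
--
--     Returns:
--         List where word_to_tokens[i] contains the token indices for word i
--     """
--     word_to_tokens: List[List[int]] = [[] for _ in word_spans]
--
--     for tok_idx, (tok_start, tok_end) in enumerate(token_offsets):
--         # Skip special tokens with (0, 0) offset
--         if tok_start == tok_end:
--             continue
--
--         for word_idx, (word_start, word_end) in enumerate(word_spans):
--             # Check for overlap: token and word spans intersect
--             if tok_start < word_end and tok_end > word_start:
--                 word_to_tokens[word_idx].append(tok_idx)
--
--     return word_to_tokens
-- ===== SOURCE B (Python) =====
-- from typing import Dict, List, Optional, Tuple, Union
--
-- def align_tokens_to_words(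
--     token_offsets: List[Tuple[int, int]],
--     word_spans: List[Tuple[int, int]],
-- ) -> List[List[int]]:
--     # Sort the (index, span) pairs once by word start; then for each token walk
--     # only the prefix of words whose start lies before the token's end and stop
--     # (break) at the first word starting at/after it -- correct because starts
--     # are ascending, so no later word can overlap the token either.
--     order = sorted(enumerate(word_spans), key=lambda p: p[1][0])
--     word_to_tokens: List[List[int]] = [[] for _ in word_spans]
--     for tok_idx, (tok_start, tok_end) in enumerate(token_offsets):
--         if tok_start == tok_end:
--             continue
--         for word_idx, (word_start, word_end) in order:
--             if word_start >= tok_end: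
--                 break
--             if word_end > tok_start:
--                 word_to_tokens[word_idx].append(tok_idx)
--     return word_to_tokens
-- ===== Notes on version B (the rewrite author's own statement) =====
-- stated objective: alternative
-- what changed: Instead of testing every token against every word, B sorts the (index, span) pairs by word start once and, for each token, scans only the sorted prefix of words starting before the token's end, breaking at the first word starting at or after it.
import Mathlib
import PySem

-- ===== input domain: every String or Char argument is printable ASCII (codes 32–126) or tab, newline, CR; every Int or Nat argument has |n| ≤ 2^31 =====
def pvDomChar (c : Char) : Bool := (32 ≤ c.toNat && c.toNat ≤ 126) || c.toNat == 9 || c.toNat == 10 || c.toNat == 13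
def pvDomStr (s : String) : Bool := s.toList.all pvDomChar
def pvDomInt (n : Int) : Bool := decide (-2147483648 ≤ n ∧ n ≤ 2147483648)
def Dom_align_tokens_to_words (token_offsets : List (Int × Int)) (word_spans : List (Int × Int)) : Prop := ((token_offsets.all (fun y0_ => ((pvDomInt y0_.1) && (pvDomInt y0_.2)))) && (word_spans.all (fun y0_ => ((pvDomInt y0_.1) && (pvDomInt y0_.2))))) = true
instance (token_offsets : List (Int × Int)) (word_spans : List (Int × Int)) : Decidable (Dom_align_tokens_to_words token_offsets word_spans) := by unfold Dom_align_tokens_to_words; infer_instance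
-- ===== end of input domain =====

-- B sorts the (index, span) pairs once by word start and, per token, scans only the
-- prefix of words starting before the token's end (early break); A scans every word
-- for every token. Same return value; alternative algorithm (output-sensitive scan).


-- ===== PORT A =====
-- token-major: start from one empty list per word, then for each non-degenerate
-- token append its index to every overlapping word's list (list mutation → List.modify)
def align_tokens_to_words (token_offsets : List (Int × Int)) (word_spans : List (Int × Int)) : List (List Int) :=
  (PySem.List.enumerate token_offsets).foldl
    (fun word_to_tokens p =>
      if p.2.1 = p.2.2 then word_to_tokens
      else
        (PySem.List.enumerate word_spans).foldl
          (fun st q =>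
            if p.2.1 < q.2.2 ∧ p.2.2 > q.2.1 then st.modify q.1.toNat (fun l => l ++ [p.1])
            else st)
          word_to_tokens)
    (word_spans.map (fun _ => ([] : List Int)))

-- ===== PORT B =====
-- B's inner 'for … in order: if word_start >= tok_end: break …' loop, as structural recursion
def pvScanB (ts te s : Int) : List (Int × (Int × Int)) → List (List Int) → List (List Int)
  | [], st => st
  | p :: rest, st =>
    if p.2.1 ≥ te then st
    else pvScanB ts te s rest
      (if p.2.2 > ts then st.modify p.1.toNat (fun l => l ++ [s]) else st)

-- sort (index, span) pairs by word start once; per token scan the prefix with break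
def align_tokens_to_words_alt (token_offsets : List (Int × Int)) (word_spans : List (Int × Int)) : List (List Int) :=
  let order := PySem.List.sorted (PySem.List.enumerate word_spans) (fun p => p.2.1)
  (PySem.List.enumerate token_offsets).foldl
    (fun word_to_tokens p =>
      if p.2.1 = p.2.2 then word_to_tokens
      else pvScanB p.2.1 p.2.2 p.1 order word_to_tokens)
    (word_spans.map (fun _ => ([] : List Int)))

-- ===== PRECONDITION & SPEC =====
def Spec_align_tokens_to_words (token_offsets : List (Int × Int)) (word_spans : List (Int × Int)) (out : List (List Int)) : Prop := out = align_tokens_to_words_alt token_offsets word_spans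
instance (token_offsets : List (Int × Int)) (word_spans : List (Int × Int)) (out : List (List Int)) : Decidable (Spec_align_tokens_to_words token_offsets word_spans out) := by unfold Spec_align_tokens_to_words; infer_instance

-- ===== CLAIM (what is proved, stated in full; the proofs are below) =====
def Claim_equal_align_tokens_to_words : Prop := ∀ (token_offsets : List (Int × Int)) (word_spans : List (Int × Int)), Dom_align_tokens_to_words token_offsets word_spans → Spec_align_tokens_to_words token_offsets word_spans (align_tokens_to_words token_offsets word_spans)

-- ===== LEMMAS AND PROOFS =====

-- the break loop processes exactly the takeWhile-prefix of its list
theorem pvScanB_eq_takeWhile (ts te s : Int) :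
    ∀ (L : List (Int × (Int × Int))) (st : List (List Int)),
      pvScanB ts te s L st =
        (L.takeWhile (fun p => decide (p.2.1 < te))).foldl
          (fun st p => if p.2.2 > ts then st.modify p.1.toNat (fun l => l ++ [s]) else st) st := by
  intro L
  induction L with
  | nil => intro st; simp [pvScanB]
  | cons p L ih =>
    intro st
    by_cases h : p.2.1 < te
    · simp [pvScanB, h, not_le.mpr h, ih]
    · simp [pvScanB, h, not_lt.mp h]

-- on a list sorted by word start, the break-prefix is exactly the filter
theorem pvTakeWhile_eq_filter (te : Int) :
    ∀ (L : List (Int × (Int × Int))), L.Pairwise (fun a b => a.2.1 ≤ b.2.1) →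
      L.takeWhile (fun p => decide (p.2.1 < te)) = L.filter (fun p => decide (p.2.1 < te)) := by
  intro L
  induction L with
  | nil => intro _; rfl
  | cons p L ih =>
    intro hp
    rcases List.pairwise_cons.mp hp with ⟨hhead, htail⟩
    by_cases h : p.2.1 < te
    · simp [h, ih htail]
    · have : L.filter (fun p => decide (p.2.1 < te)) = [] := by
        rw [List.filter_eq_nil_iff]
        intro a ha
        simp only [decide_eq_true_eq]
        have := hhead a ha
        omega
      simp [h, this]

-- pointwise characterisation of a fold of conditional modifies over distinct nonnegative indices
theorem pvFold_modify_getElem (c : (Int × Int) → Prop) [DecidablePred c] :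
    ∀ (Q : List (Int × (Int × Int))) (st : List (List Int)) (s : Int),
      (Q.map Prod.fst).Nodup →
      (∀ p ∈ Q, 0 ≤ p.1) →
      ∀ k : Nat,
        (Q.foldl (fun st p => if c p.2 then st.modify p.1.toNat (fun l => l ++ [s]) else st) st)[k]? =
          if ∃ p ∈ Q, p.1 = (k : Int) ∧ c p.2 then st[k]?.map (fun l => l ++ [s]) else st[k]? := by
  intro Q
  induction Q with
  | nil => intro st s _ _ k; simp
  | cons p Q ih =>
    intro st s hnd hpos k
    rw [List.map_cons] at hnd
    rcases List.nodup_cons.mp hnd with ⟨hnotin, hndQ⟩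
    have hpos' : ∀ q ∈ Q, 0 ≤ q.1 := fun q hq => hpos q (List.mem_cons_of_mem _ hq)
    have hp0 : 0 ≤ p.1 := hpos p List.mem_cons_self
    rw [List.foldl_cons]
    by_cases hc : c p.2
    · rw [if_pos hc, ih _ s hndQ hpos' k]
      by_cases hk : p.1 = (k : Int)
      · -- head fires at index k; tail cannot touch k again (nodup)
        have htail : ¬ ∃ q ∈ Q, q.1 = (k : Int) ∧ c q.2 := by
          rintro ⟨q, hq, hq1, _⟩
          exact hnotin (by rw [hk, ← hq1]; exact List.mem_map_of_mem hq)
        have hhead : ∃ q ∈ p :: Q, q.1 = (k : Int) ∧ c q.2 :=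
          ⟨p, List.mem_cons_self, hk, hc⟩
        rw [if_neg htail, if_pos hhead]
        have : p.1.toNat = k := by omega
        simp [this]
      · have hne : p.1.toNat ≠ k := by omega
        have : (st.modify p.1.toNat (fun l => l ++ [s]))[k]? = st[k]? := by
          simp [hne]
        rw [this]
        congr 1
        simp only [eq_iff_iff, List.mem_cons]
        constructor
        · rintro ⟨q, hq, h1, h2⟩; exact ⟨q, Or.inr hq, h1, h2⟩
        · rintro ⟨q, hq | hq, h1, h2⟩
          · exact absurd h1 (hq ▸ hk)
          · exact ⟨q, hq, h1, h2⟩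
    · rw [if_neg hc, ih _ s hndQ hpos' k]
      congr 1
      simp only [eq_iff_iff, List.mem_cons]
      constructor
      · rintro ⟨q, hq, h1, h2⟩; exact ⟨q, Or.inr hq, h1, h2⟩
      · rintro ⟨q, hq | hq, h1, h2⟩
        · exact absurd h2 (hq ▸ hc)
        · exact ⟨q, hq, h1, h2⟩

-- enumerate has distinct, nonnegative first components
theorem pvEnum_fst_nodup {α : Type} (xs : List α) (s : Int) :
    ((PySem.List.enumerate xs s).map Prod.fst).Nodup :=
  ((List.pairwise_map).mpr ((PySem.List.pairwise_lt_enumerate xs s))).imp ne_of_lt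

theorem pvEnum_fst_nonneg {α : Type} (xs : List α) (p : Int × α)
    (hp : p ∈ PySem.List.enumerate xs 0) : 0 ≤ p.1 := by
  rcases (PySem.List.mem_enumerate_iff xs 0 p).mp hp with ⟨k, _, rfl⟩
  simp

-- per-token step equality: A's full scan over words = B's break-scan over the sorted pairs
theorem pvStep_eq (word_spans : List (Int × Int)) (ts te : Int) (s : Int)
    (st : List (List Int)) :
    (PySem.List.enumerate word_spans).foldl
      (fun st q => if ts < q.2.2 ∧ te > q.2.1 then st.modify q.1.toNat (fun l => l ++ [s]) else st) st
    = pvScanB ts te s (PySem.List.sorted (PySem.List.enumerate word_spans) (fun p => p.2.1)) st := by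
  have hperm := PySem.List.sorted_perm (PySem.List.enumerate word_spans) (fun p => p.2.1) false
  have hsortnd : ((PySem.List.sorted (PySem.List.enumerate word_spans) (fun p => p.2.1)).map Prod.fst).Nodup :=
    ((hperm.map Prod.fst).nodup_iff).mpr (pvEnum_fst_nodup word_spans 0)
  rw [pvScanB_eq_takeWhile, pvTakeWhile_eq_filter te _
      (PySem.List.sorted_pairwise (PySem.List.enumerate word_spans) (fun p => p.2.1))]
  apply List.ext_getElem?
  intro k
  rw [pvFold_modify_getElem (fun w => ts < w.2 ∧ te > w.1) _ st s
        (pvEnum_fst_nodup word_spans 0) (pvEnum_fst_nonneg word_spans),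
      pvFold_modify_getElem (fun w => w.2 > ts) _ st s
        (List.Nodup.sublist (List.Sublist.map Prod.fst List.filter_sublist) hsortnd)
        (fun p hp => pvEnum_fst_nonneg word_spans p
          ((PySem.List.mem_sorted _ _ _ _).mp (List.mem_filter.mp hp).1))]
  congr 1
  simp only [eq_iff_iff, List.mem_filter, PySem.List.mem_sorted, decide_eq_true_eq]
  constructor
  · rintro ⟨q, hq, h1, h2, h3⟩; exact ⟨q, ⟨hq, h3⟩, h1, h2⟩
  · rintro ⟨q, ⟨hq, h3⟩, h1, h2⟩; exact ⟨q, hq, h1, h2, h3⟩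

-- ===== VERDICT (by name: the statement is the Claim_ definition above) =====
theorem align_tokens_to_words_spec : Claim_equal_align_tokens_to_words := by
  intro toks spans _
  unfold Spec_align_tokens_to_words align_tokens_to_words align_tokens_to_words_alt
  congr 1
  funext st p
  by_cases h : p.2.1 = p.2.2
  · simp [h]
  · simp only [if_neg h]
    exact pvStep_eq spans p.2.1 p.2.2 p.1 st
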